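-- pv_equiv track=rewrite | github.com/slashbreak/Advent-of-Code | 2019/day6.py | plot_route
-- ===== SOURCE A (Python) =====
-- def plot_route(planets, src, dest, route, count=1):
--     route.append(src)
--     if src == dest:
--         #route.append(src)
--         return 0
--     if planets[src] == dest:
--         #route.append(src)
--         return count
--     else:
--         #route.append(src)
--         return plot_route(planets, planets[src], dest, route, count+1)
-- ===== SOURCE B (Python) =====
-- def plot_route(planets, src, dest, route, count=1):
--     # Iterative walk with a step counter instead of threading `count` through a recursion;
--     # the answer is derived from the number of steps at the end.
--     node, steps = src, 0
--     while node != dest: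
--         route.append(node)
--         node = planets[node]
--         steps += 1
--     if steps == 0:
--         route.append(src)  # the start is still recorded when src == dest
--         return 0
--     return count + steps - 1
-- ===== Notes on version B (the rewrite author's own statement) =====
-- stated objective: alternative
-- what changed: Replaces the tail recursion that threads a running count through each call with an iterative walk that only counts steps and computes the result from the step total afterwards.
import Mathlib
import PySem

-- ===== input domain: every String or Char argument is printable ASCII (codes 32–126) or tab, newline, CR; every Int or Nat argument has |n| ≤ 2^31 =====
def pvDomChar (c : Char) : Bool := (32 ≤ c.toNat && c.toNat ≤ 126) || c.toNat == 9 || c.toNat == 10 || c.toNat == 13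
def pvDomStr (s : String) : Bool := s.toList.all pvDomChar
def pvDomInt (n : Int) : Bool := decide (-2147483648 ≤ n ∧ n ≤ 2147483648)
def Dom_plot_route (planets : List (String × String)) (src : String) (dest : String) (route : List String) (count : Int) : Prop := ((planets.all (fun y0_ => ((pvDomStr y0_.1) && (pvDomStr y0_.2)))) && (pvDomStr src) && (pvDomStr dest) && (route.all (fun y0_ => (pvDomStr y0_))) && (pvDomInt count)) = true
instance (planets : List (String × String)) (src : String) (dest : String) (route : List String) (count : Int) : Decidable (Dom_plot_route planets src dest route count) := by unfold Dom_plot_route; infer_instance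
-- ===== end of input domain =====

-- B replaces A's count-threading tail recursion by an iterative walk that counts steps and
-- derives the result from the step total (objective: alternative decomposition). Both programs
-- mutate `route` identically in Python; the equivalence proved here is about the RETURN value only.


-- first-match lookup in the association list (the Python dict lookup planets[k])
def pvLook (planets : List (String × String)) (k : String) : Option String :=
  match planets with
  | [] => none
  | (a, b) :: rest => if a = k then some b else pvLook rest k

-- ===== PORT A =====
-- A's tail recursion, with a fuel guard for totality only (within Pre_ the fuel never runs out;
-- `route` is only mutated in Python, it does not affect the return value)
def plot_routeA (planets : List (String × String)) (dest : String) (fuel : Nat) (src : String) (count : Int) : Int :=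
  match fuel with
  | 0 => 0
  | fuel + 1 =>
    if src = dest then 0
    else
      match pvLook planets src with
      | none => 0   -- Python raises KeyError here (outside Pre_)
      | some nxt => if nxt = dest then count else plot_routeA planets dest fuel nxt (count + 1)

def plot_route (planets : List (String × String)) (src : String) (dest : String) (route : List String) (count : Int) : Int :=
  plot_routeA planets dest (planets.length + 1) src count

-- ===== PORT B =====
-- Source B's while-loop, ported as a bounded fold whose state freezes once the walker reaches dest
-- (within Pre_ the bound planets.length + 1 is never exhausted; a missing key is a KeyError in
-- Python and lies outside Pre_)
def plot_route_alt (planets : List (String × String)) (src : String) (dest : String) (route : List String) (count : Int) : Int :=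
  let st := (List.range (planets.length + 1)).foldl
    (fun (st : String × Int) _ =>
      if st.1 = dest then st else ((pvLook planets st.1).getD st.1, st.2 + 1))
    (src, 0)
  if st.2 = 0 then 0 else count + st.2 - 1

-- ===== PRECONDITION & SPEC =====
-- n-fold iteration of the parent lookup starting at node
def pvIter (planets : List (String × String)) : Nat → String → Option String
  | 0, node => some node
  | n + 1, node =>
    match pvLook planets node with
    | none => none
    | some nxt => pvIter planets n nxt

-- Pre_ excludes exactly the inputs on which the Python A does not return: where a KeyError is
-- raised (a node off the chain with no parent entry) or the chain cycles without reaching dest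
-- (infinite recursion). A returns iff dest is reachable, and then within planets.length steps.
def Pre_plot_route (planets : List (String × String)) (src : String) (dest : String) (route : List String) (count : Int) : Prop :=
  ∃ i ≤ planets.length, pvIter planets i src = some dest
instance (planets : List (String × String)) (src : String) (dest : String) (route : List String) (count : Int) : Decidable (Pre_plot_route planets src dest route count) := by unfold Pre_plot_route; infer_instance

def pvWitness_plot_route : (List (String × String)) × String × String × List String × Int :=
  ([("B", "COM"), ("C", "B")], "C", "COM", [], 1)

def Spec_plot_route (planets : List (String × String)) (src : String) (dest : String) (route : List String) (count : Int) (out : Int) : Prop := out = plot_route_alt planets src dest route count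
instance (planets : List (String × String)) (src : String) (dest : String) (route : List String) (count : Int) (out : Int) : Decidable (Spec_plot_route planets src dest route count out) := by unfold Spec_plot_route; infer_instance

-- ===== CLAIM (what is proved, stated in full; the proofs are below) =====
def Claim_equal_plot_route : Prop := ∀ (planets : List (String × String)) (src : String) (dest : String) (route : List String) (count : Int), Dom_plot_route planets src dest route count → Pre_plot_route planets src dest route count → Spec_plot_route planets src dest route count (plot_route planets src dest route count)

-- ===== LEMMAS AND PROOFS =====

-- the loop step of port B
def pvStep (planets : List (String × String)) (dest : String) (st : String × Int) : String × Int :=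
  if st.1 = dest then st else ((pvLook planets st.1).getD st.1, st.2 + 1)

lemma foldl_step_eq_iterate (planets : List (String × String)) (dest : String) :
    ∀ (l : List Nat) (st : String × Int),
      l.foldl (fun st _ => pvStep planets dest st) st = (pvStep planets dest)^[l.length] st := by
  intro l
  induction l with
  | nil => intro st; simp
  | cons x xs ih =>
      intro st
      simp [List.foldl_cons, ih, Function.iterate_succ_apply]

-- minimal distance: reached in d steps and not earlier
def pvMinDist (planets : List (String × String)) (dest : String) (node : String) (d : Nat) : Prop :=
  pvIter planets d node = some dest ∧ ∀ j < d, pvIter planets j node ≠ some dest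

lemma exists_minDist (planets : List (String × String)) (dest node : String) (i : Nat)
    (h : pvIter planets i node = some dest) : ∃ d ≤ i, pvMinDist planets dest node d := by
  classical
  have hex : ∃ d, pvIter planets d node = some dest := ⟨i, h⟩
  refine ⟨Nat.find hex, Nat.find_min' hex h, Nat.find_spec hex, fun j hj => Nat.find_min hex hj⟩

lemma minDist_zero_iff (planets : List (String × String)) (dest node : String) (d : Nat)
    (h : pvMinDist planets dest node d) : d = 0 ↔ node = dest := by
  constructor
  · intro h0; subst h0
    simpa [pvIter] using h.1
  · intro hnd; subst hnd
    by_contra hne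
    exact h.2 0 (Nat.pos_of_ne_zero hne) (by simp [pvIter])

lemma minDist_step (planets : List (String × String)) (dest node : String) (d : Nat)
    (h : pvMinDist planets dest node (d + 1)) :
    ∃ nxt, pvLook planets node = some nxt ∧ pvMinDist planets dest nxt d := by
  obtain ⟨h1, h2⟩ := h
  cases hl : pvLook planets node with
  | none => rw [pvIter, hl] at h1; exact absurd h1 (by simp)
  | some nxt =>
      refine ⟨nxt, rfl, ?_, ?_⟩
      · rw [pvIter, hl] at h1; exact h1
      · intro j hj hit
        exact h2 (j + 1) (by omega) (by rw [pvIter, hl]; exact hit)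

-- port A's recursion computes `if d = 0 then 0 else count + d - 1` for minimal distance d ≤ fuel
lemma routeA_eq_dist (planets : List (String × String)) (dest : String) :
    ∀ (d : Nat) (fuel : Nat) (node : String) (count : Int), d ≤ fuel →
      pvMinDist planets dest node d →
      plot_routeA planets dest fuel node count = if d = 0 then 0 else count + d - 1 := by
  intro d
  induction d with
  | zero =>
      intro fuel node count _ hmin
      have hnd : node = dest := (minDist_zero_iff planets dest node 0 hmin).1 rfl
      subst hnd
      cases fuel <;> simp [plot_routeA]
  | succ d ih =>
      intro fuel node count hle hmin
      obtain ⟨f, rfl⟩ : ∃ f, fuel = f + 1 := ⟨fuel - 1, by omega⟩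
      have hnd : node ≠ dest := by
        intro h; exact absurd ((minDist_zero_iff planets dest node (d + 1) hmin).2 h) (by omega)
      obtain ⟨nxt, hl, hmin'⟩ := minDist_step planets dest node d hmin
      by_cases hnx : nxt = dest
      · have hd0 : d = 0 := (minDist_zero_iff planets dest nxt d hmin').2 hnx
        subst hd0
        simp [plot_routeA, hnd, hl, hnx]
      · have hd : d ≠ 0 := fun h0 => hnx ((minDist_zero_iff planets dest nxt d hmin').1 h0)
        rw [show plot_routeA planets dest (f + 1) node count
              = plot_routeA planets dest f nxt (count + 1) by
            simp [plot_routeA, hnd, hl, hnx],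
          ih f nxt (count + 1) (by omega) hmin', if_neg hd, if_neg (by omega)]
        push_cast
        omega

-- port B's step freezes at dest
lemma step_fix (planets : List (String × String)) (dest : String) (s : Int) (k : Nat) :
    (pvStep planets dest)^[k] (dest, s) = (dest, s) := by
  induction k with
  | zero => rfl
  | succ k ih =>
      have h1 : pvStep planets dest (dest, s) = (dest, s) := by simp [pvStep]
      rw [Function.iterate_succ_apply, h1]; exact ih

-- iterating the step k ≥ d times from a node at minimal distance d lands on (dest, s + d)
lemma iterate_step_eq (planets : List (String × String)) (dest : String) :
    ∀ (d k : Nat) (node : String) (s : Int), d ≤ k → pvMinDist planets dest node d →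
      (pvStep planets dest)^[k] (node, s) = (dest, s + d) := by
  intro d
  induction d with
  | zero =>
      intro k node s _ hmin
      have : node = dest := (minDist_zero_iff planets dest node 0 hmin).1 rfl
      subst this
      simpa using step_fix planets node s k
  | succ d ih =>
      intro k node s hle hmin
      obtain ⟨k', rfl⟩ : ∃ k', k = k' + 1 := ⟨k - 1, by omega⟩
      have hnd : node ≠ dest := by
        intro h; exact absurd ((minDist_zero_iff planets dest node (d + 1) hmin).2 h) (by omega)
      obtain ⟨nxt, hl, hmin'⟩ := minDist_step planets dest node d hmin
      rw [Function.iterate_succ_apply,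
        show pvStep planets dest (node, s) = (nxt, s + 1) by simp [pvStep, hnd, hl],
        ih k' nxt (s + 1) (by omega) hmin']
      push_cast
      ring_nf

-- ===== VERDICT (by name: the statement is the Claim_ definition above) =====
theorem plot_route_spec : Claim_equal_plot_route := by
  intro planets src dest route count _hdom hpre
  unfold Spec_plot_route plot_route plot_route_alt
  obtain ⟨i, hi, hit⟩ := hpre
  obtain ⟨d, hdi, hmin⟩ := exists_minDist planets dest src i hit
  rw [routeA_eq_dist planets dest d (planets.length + 1) src count (by omega) hmin]
  have hfold := foldl_step_eq_iterate planets dest (List.range (planets.length + 1)) (src, 0)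
  simp only [List.length_range] at hfold
  have hiter := iterate_step_eq planets dest d (planets.length + 1) src 0 (by omega) hmin
  simp only [pvStep] at hfold
  simp only [hfold, hiter]
  split_ifs <;> omega
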